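-- pv_equiv track=rewrite | github.com/zardra/Julian | julian.py | convert_to_julian
-- ===== SOURCE A (Python) =====
-- def convert_to_julian(todays_date):
--     todays_julian = 0
--     todays_year = todays_date[0]
--     todays_month = todays_date[1] - 1 # sets the month to match the list of days_in_months
--     todays_day = todays_date[2]
--     i = 0
--
--     # list of number of days in each month in a leap year
--     days_in_months = [31, 29, 31, 30, 31, 30, 31, 31, 30, 31, 30, 31]
--
--     # if the year is a leap year
--     if todays_year % 4 == 0:
--         while i < todays_month:
--             todays_julian += days_in_months[i]
--             i += 1
--     # if the year is not a leap year
--     else: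
--         days_in_months[1] = 28
--         while i < todays_month:
--             todays_julian += days_in_months[i]
--             i += 1
--
--     # add in the days from the current month
--     todays_julian += todays_day
--     return todays_julian
-- ===== SOURCE B (Python) =====
-- def convert_to_julian(todays_date):
--     year, month, day = todays_date
--     # cumulative day offsets at the start of each month in a leap year
--     offsets = [0, 31, 60, 91, 121, 152, 182, 213, 244, 274, 305, 335, 366]
--     m = max(month - 1, 0)
--     total = offsets[m] + day
--     # in a non-leap year February is one day shorter; it only matters once past it
--     if year % 4 != 0 and m >= 2:
--         total -= 1
--     return total
-- ===== Notes on version B (the rewrite author's own statement) =====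
-- stated objective: idiomatic
-- what changed: Replaces the month-summing while loop over a mutated days-in-months list with a single lookup in a precomputed cumulative-offset table plus a conditional -1 for non-leap years past February.
import Mathlib
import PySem

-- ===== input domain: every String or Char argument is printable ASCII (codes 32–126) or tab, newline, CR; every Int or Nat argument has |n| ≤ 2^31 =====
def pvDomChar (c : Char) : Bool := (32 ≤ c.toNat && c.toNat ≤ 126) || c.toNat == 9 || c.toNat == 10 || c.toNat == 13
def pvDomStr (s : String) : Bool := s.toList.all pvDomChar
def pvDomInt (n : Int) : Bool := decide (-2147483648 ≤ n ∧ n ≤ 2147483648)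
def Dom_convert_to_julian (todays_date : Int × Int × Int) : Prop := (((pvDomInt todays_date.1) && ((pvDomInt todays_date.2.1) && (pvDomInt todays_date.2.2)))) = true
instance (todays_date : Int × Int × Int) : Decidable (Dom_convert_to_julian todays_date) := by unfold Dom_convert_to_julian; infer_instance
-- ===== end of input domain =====

-- B replaces A's month-summing while loop with one lookup in a cumulative-offset table (idiomatic O(1) form).

-- ===== PORT A =====
-- the while loop 'i = 0; while i < todays_month: todays_julian += days_in_months[i]; i += 1'
-- as a fold over range(0, todays_month); pyGetD's default 0 is only reached where Python raises
-- IndexError (todays_month > 12), which Pre_ excludes.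
def convert_to_julian (todays_date : Int × Int × Int) : Int :=
  let todays_year := todays_date.1
  let todays_month := todays_date.2.1 - 1
  let todays_day := todays_date.2.2
  let days_in_months : List Int := [31, 29, 31, 30, 31, 30, 31, 31, 30, 31, 30, 31]
  let todays_julian : Int :=
    if todays_year % 4 == 0 then
      (PySem.List.pyRange 0 todays_month 1).foldl
        (fun acc i => acc + PySem.List.pyGetD days_in_months i 0) 0
    else
      let days_in_months : List Int := [31, 28, 31, 30, 31, 30, 31, 31, 30, 31, 30, 31]
      (PySem.List.pyRange 0 todays_month 1).foldl
        (fun acc i => acc + PySem.List.pyGetD days_in_months i 0) 0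
  todays_julian + todays_day

-- ===== PORT B =====
def convert_to_julian_alt (todays_date : Int × Int × Int) : Int :=
  let year := todays_date.1
  let month := todays_date.2.1
  let day := todays_date.2.2
  let offsets : List Int := [0, 31, 60, 91, 121, 152, 182, 213, 244, 274, 305, 335, 366]
  let m := max (month - 1) 0
  let total := PySem.List.pyGetD offsets m 0 + day
  if year % 4 != 0 && m ≥ 2 then total - 1 else total

-- ===== PRECONDITION & SPEC =====
-- Pre_ excludes exactly month ≥ 14, where A's while loop indexes past its 12-entry list and
-- raises IndexError (B's 13-entry table lookup raises there too).
def Pre_convert_to_julian (todays_date : Int × Int × Int) : Prop := todays_date.2.1 ≤ 13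
instance (todays_date : Int × Int × Int) : Decidable (Pre_convert_to_julian todays_date) := by unfold Pre_convert_to_julian; infer_instance
def pvWitness_convert_to_julian : (Int × Int × Int) := (2023, 3, 14)

def Spec_convert_to_julian (todays_date : Int × Int × Int) (out : Int) : Prop := out = convert_to_julian_alt todays_date
instance (todays_date : Int × Int × Int) (out : Int) : Decidable (Spec_convert_to_julian todays_date out) := by unfold Spec_convert_to_julian; infer_instance

-- ===== CLAIM (what is proved, stated in full; the proofs are below) =====
def Claim_equal_convert_to_julian : Prop := ∀ (todays_date : Int × Int × Int), Dom_convert_to_julian todays_date → Pre_convert_to_julian todays_date → Spec_convert_to_julian todays_date (convert_to_julian todays_date)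

-- ===== LEMMAS AND PROOFS =====

-- ===== VERDICT (by name: the statement is the Claim_ definition above) =====
theorem convert_to_julian_spec : Claim_equal_convert_to_julian := by
  rintro ⟨y, mo, d⟩ _ pre
  unfold Spec_convert_to_julian convert_to_julian convert_to_julian_alt
  simp only []
  by_cases hlo : mo ≤ 0
  · have h0 : max (mo - 1) 0 = 0 := by omega
    have hnil : PySem.List.pyRange 0 (mo - 1) 1 = [] :=
      PySem.List.pyRange_one_eq_nil (by omega)
    by_cases h4 : y % 4 = 0 <;>
      simp [hnil, h0, h4]
  · have hr : 1 ≤ mo ∧ mo ≤ 13 := ⟨by omega, by exact pre⟩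
    obtain ⟨h1, h13⟩ := hr
    interval_cases mo <;>
      by_cases h4 : y % 4 = 0 <;>
        simp [h4, PySem.List.pyRange_one] <;>
          norm_num [List.range_succ, PySem.List.pyGetD, PySem.List.pyGet?, PySem.List.pyIdx?, Int.toNat, List.getElem_cons_succ, List.getElem_cons_zero] <;> omega
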